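-- pv_equiv track=rewrite | github.com/roeimed0/bacterial-gene-prediction | src/traditional_methods.py | extract_all_non_orf_regions
-- ===== SOURCE A (Python) =====
-- from typing import Dict, List, Tuple
--
-- def extract_all_non_orf_regions(
--     sequence: str,
--     all_orfs: List[Dict],
--     min_length: int = 150
-- ) -> Tuple[str, List[Tuple[int, int]]]:
--     """Extract all non-ORF regions (no filtering)."""
--     occupied = []
--     for orf in all_orfs:
--         start = orf.get('genome_start', orf['start'])
--         end = orf.get('genome_end', orf['end'])
--         if start > end:
--             start, end = end, start
--         occupied.append((start, end))
--
--     merged = []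
--     for s, e in sorted(occupied):
--         if merged and s <= merged[-1][1]:
--             merged[-1] = (merged[-1][0], max(merged[-1][1], e))
--         else:
--             merged.append((s, e))
--
--     non_orf_seqs = []
--     non_orf_coords = []
--     last_end = 1
--     for s, e in merged:
--         if s - last_end >= min_length:
--             non_orf_coords.append((last_end, s-1))
--             non_orf_seqs.append(sequence[last_end-1:s-1])
--         last_end = e + 1
--     if len(sequence) - last_end + 1 >= min_length:
--         non_orf_coords.append((last_end, len(sequence)))
--         non_orf_seqs.append(sequence[last_end-1:])
--
--     concatenated = ''.join(non_orf_seqs)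
--     return concatenated, non_orf_coords
-- ===== SOURCE B (Python) =====
-- def extract_all_non_orf_regions(sequence, all_orfs, min_length=150):
--     """Declarative rewrite: recursive interval merging, then gaps as a
--     zip/filter over merged boundaries, and the concatenation as a join of
--     slices taken per coordinate pair."""
--     norm = sorted(
--         tuple(sorted((orf.get('genome_start', orf['start']),
--                       orf.get('genome_end', orf['end']))))
--         for orf in all_orfs
--     )
--
--     def merge(ivs):
--         if not ivs:
--             return []
--         (s, e), rest = ivs[0], ivs[1:]
--         return absorb(s, e, rest)
--
--     def absorb(s, e, rest):
--         if not rest: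
--             return [(s, e)]
--         (s2, e2), tail = rest[0], rest[1:]
--         if s2 <= e:
--             return absorb(s, max(e, e2), tail)
--         return [(s, e)] + absorb(s2, e2, tail)
--
--     merged = merge(norm)
--     n = len(sequence)
--     starts = [1] + [e + 1 for _, e in merged]
--     ends = [s - 1 for s, _ in merged] + [n]
--     coords = [(a, b) for a, b in zip(starts, ends) if b - a + 1 >= min_length]
--     concatenated = ''.join(sequence[a - 1:b] for a, b in coords)
--     return concatenated, coords
-- ===== Notes on version B (the rewrite author's own statement) =====
-- stated objective: alternative
-- what changed: A's in-place last-element-mutating merge loop and stateful last_end gap loop are replaced by a recursive interval merge plus a declarative zip/filter over merged boundaries, with the concatenation produced as a join of slices per coordinate pair.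
import Mathlib
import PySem

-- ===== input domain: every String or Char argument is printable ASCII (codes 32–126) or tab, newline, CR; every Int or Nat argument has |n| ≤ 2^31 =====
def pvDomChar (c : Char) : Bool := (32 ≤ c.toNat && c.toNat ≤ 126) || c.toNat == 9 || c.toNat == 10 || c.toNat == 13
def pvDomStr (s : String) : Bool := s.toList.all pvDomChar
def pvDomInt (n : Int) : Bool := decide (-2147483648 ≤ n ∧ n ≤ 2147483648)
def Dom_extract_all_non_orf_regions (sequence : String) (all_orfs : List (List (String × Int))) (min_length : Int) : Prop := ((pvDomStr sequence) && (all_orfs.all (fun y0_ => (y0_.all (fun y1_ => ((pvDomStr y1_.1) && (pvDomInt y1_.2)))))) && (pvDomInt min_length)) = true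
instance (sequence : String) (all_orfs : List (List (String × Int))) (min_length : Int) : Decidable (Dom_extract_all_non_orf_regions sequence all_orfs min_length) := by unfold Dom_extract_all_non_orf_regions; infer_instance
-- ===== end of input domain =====

-- B replaces A's in-place merge loop and stateful gap loop by a recursive merge plus a
-- declarative zip/filter over merged boundaries (objective: alternative decomposition; return value only).

-- ===== PORT A =====
-- orf.get('genome_start', orf['start']) etc.; the `.getD 0` stands for Python's KeyError on a
-- missing 'start'/'end' key, which Pre_ excludes.
def pvNormA (orf : List (String × Int)) : Int × Int :=
  let d := PySem.Dict.ofList orf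
  let s := (d.get? "genome_start").getD ((d.get? "start").getD 0)
  let e := (d.get? "genome_end").getD ((d.get? "end").getD 0)
  if s > e then (e, s) else (s, e)

-- `merged` kept reversed (head = merged[-1]) so the in-place update of merged[-1] is a head update
def pvMergeStepA (acc : List (Int × Int)) (p : Int × Int) : List (Int × Int) :=
  match acc with
  | (s0, e0) :: rest => if p.1 ≤ e0 then (s0, max e0 p.2) :: rest else p :: (s0, e0) :: rest
  | [] => [p]

def pvGapStepA (sequence : String) (min_length : Int)
    (st : List String × List (Int × Int) × Int) (p : Int × Int) :
    List String × List (Int × Int) × Int :=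
  if p.1 - st.2.2 ≥ min_length then
    (st.1 ++ [PySem.Str.slice sequence (some (st.2.2 - 1)) (some (p.1 - 1))],
     st.2.1 ++ [(st.2.2, p.1 - 1)], p.2 + 1)
  else (st.1, st.2.1, p.2 + 1)

def extract_all_non_orf_regions (sequence : String) (all_orfs : List (List (String × Int))) (min_length : Int) : String × (List (Int × Int)) :=
  let occupied := all_orfs.foldl (fun acc orf => acc ++ [pvNormA orf]) []
  let merged := ((PySem.List.sorted2 occupied Prod.fst Prod.snd).foldl pvMergeStepA []).reverse
  let st := merged.foldl (pvGapStepA sequence min_length) ([], [], 1)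
  let n := PySem.Str.len sequence
  let fin :=
    if n - st.2.2 + 1 ≥ min_length then
      (st.1 ++ [PySem.Str.slice sequence (some (st.2.2 - 1)) none], st.2.1 ++ [(st.2.2, n)])
    else (st.1, st.2.1)
  (PySem.Str.join "" fin.1, fin.2)

-- ===== PORT B =====
-- tuple(sorted((start, end))) ; same KeyError remark as pvNormA
def pvNormB (orf : List (String × Int)) : Int × Int :=
  let d := PySem.Dict.ofList orf
  let s := (d.get? "genome_start").getD ((d.get? "start").getD 0)
  let e := (d.get? "genome_end").getD ((d.get? "end").getD 0)
  (min s e, max s e)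

def pvAbsorb (s e : Int) : List (Int × Int) → List (Int × Int)
  | [] => [(s, e)]
  | (s2, e2) :: tail => if s2 ≤ e then pvAbsorb s (max e e2) tail else (s, e) :: pvAbsorb s2 e2 tail

def pvMerge : List (Int × Int) → List (Int × Int)
  | [] => []
  | (s, e) :: rest => pvAbsorb s e rest

def extract_all_non_orf_regions_alt (sequence : String) (all_orfs : List (List (String × Int))) (min_length : Int) : String × (List (Int × Int)) :=
  let merged := pvMerge (PySem.List.sorted2 (all_orfs.map pvNormB) Prod.fst Prod.snd)
  let n := PySem.Str.len sequence
  let starts := 1 :: merged.map (fun p => p.2 + 1)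
  let ends := merged.map (fun p => p.1 - 1) ++ [n]
  let coords := (starts.zip ends).filter (fun ab => decide (ab.2 - ab.1 + 1 ≥ min_length))
  (PySem.Str.join "" (coords.map fun ab => PySem.Str.slice sequence (some (ab.1 - 1)) (some ab.2)),
   coords)

-- ===== PRECONDITION & SPEC =====
-- Pre_ excludes exactly the inputs where Python A raises KeyError: some orf dict lacks the
-- 'start' or the 'end' key (both are read unconditionally as the .get defaults).
def Pre_extract_all_non_orf_regions (sequence : String) (all_orfs : List (List (String × Int))) (min_length : Int) : Prop :=
  ∀ orf ∈ all_orfs, (PySem.Dict.ofList orf).contains "start" = true ∧ (PySem.Dict.ofList orf).contains "end" = true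
instance (sequence : String) (all_orfs : List (List (String × Int))) (min_length : Int) : Decidable (Pre_extract_all_non_orf_regions sequence all_orfs min_length) := by unfold Pre_extract_all_non_orf_regions; infer_instance

def pvWitness_extract_all_non_orf_regions : String × (List (List (String × Int))) × Int :=
  ("ACGTACGTAC", [[("start", 3), ("end", 4)], [("start", 9), ("end", 8), ("genome_end", 7)]], 2)

def Spec_extract_all_non_orf_regions (sequence : String) (all_orfs : List (List (String × Int))) (min_length : Int) (out : String × (List (Int × Int))) : Prop := out = extract_all_non_orf_regions_alt sequence all_orfs min_length
instance (sequence : String) (all_orfs : List (List (String × Int))) (min_length : Int) (out : String × (List (Int × Int))) : Decidable (Spec_extract_all_non_orf_regions sequence all_orfs min_length out) := by unfold Spec_extract_all_non_orf_regions; infer_instance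

-- ===== CLAIM (what is proved, stated in full; the proofs are below) =====
def Claim_equal_extract_all_non_orf_regions : Prop := ∀ (sequence : String) (all_orfs : List (List (String × Int))) (min_length : Int), Dom_extract_all_non_orf_regions sequence all_orfs min_length → Pre_extract_all_non_orf_regions sequence all_orfs min_length → Spec_extract_all_non_orf_regions sequence all_orfs min_length (extract_all_non_orf_regions sequence all_orfs min_length)

-- ===== LEMMAS AND PROOFS =====

theorem pvWitness_ok :
    Dom_extract_all_non_orf_regions (pvWitness_extract_all_non_orf_regions.1) (pvWitness_extract_all_non_orf_regions.2.1) (pvWitness_extract_all_non_orf_regions.2.2) ∧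
    Pre_extract_all_non_orf_regions (pvWitness_extract_all_non_orf_regions.1) (pvWitness_extract_all_non_orf_regions.2.1) (pvWitness_extract_all_non_orf_regions.2.2) := by
  decide

theorem pvNorm_eq : pvNormA = pvNormB := by
  funext orf
  simp only [pvNormA, pvNormB]
  split_ifs with h <;> simp <;> omega

-- the gaps A's third loop emits, and its final last_end, as functions of merged
def pvGaps (ml : Int) : Int → List (Int × Int) → List (Int × Int)
  | _, [] => []
  | le, (s, e) :: t => (if s - le ≥ ml then [(le, s - 1)] else []) ++ pvGaps ml (e + 1) t

def pvLast : Int → List (Int × Int) → Int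
  | le, [] => le
  | _, (_, e) :: t => pvLast (e + 1) t

theorem merge_aux (ps : List (Int × Int)) :
    ∀ (s e : Int) (rest : List (Int × Int)),
      (ps.foldl pvMergeStepA ((s, e) :: rest)).reverse = rest.reverse ++ pvAbsorb s e ps := by
  induction ps with
  | nil => intro s e rest; simp [pvAbsorb]
  | cons p t ih =>
      intro s e rest
      obtain ⟨s2, e2⟩ := p
      simp only [List.foldl_cons, pvMergeStepA, pvAbsorb]
      split_ifs with h
      · exact ih s (max e e2) rest
      · rw [ih s2 e2 ((s, e) :: rest)]; simp

theorem merge_eq (ps : List (Int × Int)) :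
    (ps.foldl pvMergeStepA []).reverse = pvMerge ps := by
  cases ps with
  | nil => simp [pvMerge]
  | cons p t =>
      obtain ⟨s, e⟩ := p
      simp only [List.foldl_cons, pvMergeStepA, pvMerge]
      simpa using merge_aux t s e []

theorem gapfold_eq (sequence : String) (ml : Int) (merged : List (Int × Int)) :
    ∀ (seqs : List String) (coords : List (Int × Int)) (le : Int),
      merged.foldl (pvGapStepA sequence ml) (seqs, coords, le)
        = (seqs ++ (pvGaps ml le merged).map
              (fun ab => PySem.Str.slice sequence (some (ab.1 - 1)) (some ab.2)),
           coords ++ pvGaps ml le merged, pvLast le merged) := by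
  induction merged with
  | nil => intro seqs coords le; simp [pvGaps, pvLast]
  | cons p t ih =>
      intro seqs coords le
      obtain ⟨s, e⟩ := p
      simp only [List.foldl_cons, pvGapStepA, pvGaps, pvLast]
      split_ifs with h
      · rw [ih]; simp
      · rw [ih]; simp

theorem zipfilter_eq (n ml : Int) (merged : List (Int × Int)) :
    ∀ le : Int,
      ((le :: merged.map (fun p => p.2 + 1)).zip (merged.map (fun p => p.1 - 1) ++ [n])).filter
          (fun ab => decide (ab.2 - ab.1 + 1 ≥ ml))
        = pvGaps ml le merged ++
            (if n - pvLast le merged + 1 ≥ ml then [(pvLast le merged, n)] else []) := by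
  induction merged with
  | nil =>
      intro le
      by_cases h : n - le + 1 ≥ ml <;> simp [pvGaps, pvLast, List.filter, h]
  | cons p t ih =>
      intro le
      obtain ⟨s, e⟩ := p
      simp only [List.map_cons, List.cons_append, List.zip_cons_cons, List.filter_cons, pvGaps, pvLast]
      rw [ih (e + 1)]
      by_cases h : s - le ≥ ml
      · simp [show ((s - 1 : Int) - le + 1 ≥ ml) from by omega, h]
      · simp [show ¬((s - 1 : Int) - le + 1 ≥ ml) from by omega, h]

theorem lslice_open_eq (xs : List Char) (a : Int) :
    PySem.List.slice xs (some a) none = PySem.List.slice xs (some a) (some (xs.length : Int)) := by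
  simp [PySem.List.slice, PySem.List.clampIdx]; split_ifs <;> omega

theorem slice_open_eq (s : String) (a : Int) :
    PySem.Str.slice s (some a) none = PySem.Str.slice s (some a) (some (PySem.Str.len s)) := by
  apply String.toList_inj.mp
  simp [PySem.Str.toList_slice, PySem.Str.len_eq]
  exact lslice_open_eq s.toList a

theorem main_eq (sequence : String) (all_orfs : List (List (String × Int))) (min_length : Int) :
    extract_all_non_orf_regions sequence all_orfs min_length
      = extract_all_non_orf_regions_alt sequence all_orfs min_length := by
  simp only [extract_all_non_orf_regions, extract_all_non_orf_regions_alt,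
    PySem.List.foldl_append_singleton_eq_map, List.nil_append, pvNorm_eq, merge_eq,
    gapfold_eq, zipfilter_eq, PySem.Str.len_eq]
  split_ifs with h
  · refine Prod.ext ?_ (by simp)
    have hs := slice_open_eq sequence
      (pvLast 1 (pvMerge (PySem.List.sorted2 (all_orfs.map pvNormB) Prod.fst Prod.snd)) - 1)
    rw [PySem.Str.len_eq] at hs
    simp [hs]
  · simp

-- ===== VERDICT (by name: the statement is the Claim_ definition above) =====
theorem extract_all_non_orf_regions_spec : Claim_equal_extract_all_non_orf_regions := by
  intro sequence all_orfs min_length _ _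
  unfold Spec_extract_all_non_orf_regions
  exact main_eq sequence all_orfs min_length
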